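-- pv_equiv track=rewrite | github.com/waltad/Codewars | associative_operation_range.py | compute_ranges
-- ===== SOURCE A (Python) =====
-- def compute_ranges(arr, op, rs):
--     output = []
--     if op == '*':
--         for i in range(len(rs)):
--             result = 1
--             for r in range(rs[i][0], rs[i][1]):
--                 result *= arr[r]
--             output.append(result)
--     elif op == '+':
--         for i in range(len(rs)):
--             result = 0
--             for r in range(rs[i][0], rs[i][1]):
--                 result += arr[r]
--             output.append(result)
--
--     return output
-- ===== SOURCE B (Python) =====
-- def compute_ranges(arr, op, rs):
--     n = len(arr)
--     if op == '+':
--         ps = [0]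
--         s = 0
--         for x in arr:
--             s += x
--             ps.append(s)
--         return [ps[b] - ps[a] if a < b else 0 for (a, b) in rs]
--     if op == '*':
--         pz = [1]   # prefix products of the nonzero elements
--         zc = [0]   # prefix counts of zero elements
--         p, z = 1, 0
--         for x in arr:
--             if x == 0:
--                 z += 1
--             else:
--                 p *= x
--             pz.append(p)
--             zc.append(z)
--         return [(0 if zc[b] > zc[a] else pz[b] // pz[a]) if a < b else 1
--                 for (a, b) in rs]
--     return []
-- ===== Notes on version B (the rewrite author's own statement) =====
-- stated objective: alternative
-- what changed: B precomputes prefix sums (for '+') resp. prefix products of the nonzero elements plus prefix zero counts (for '*') in one pass over arr and answers each query by subtraction / exact division, instead of A's per-query rescan of arr; it trades A's nested loops for precomputed tables.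
-- outside the precondition, e.g. on compute_ranges([1, 2], '+', [(-2, 2)]): A returns [6], B returns [2]; on compute_ranges([1, 2], '+', [(0, 5)]): A raises IndexError, B raises IndexError
import Mathlib
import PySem

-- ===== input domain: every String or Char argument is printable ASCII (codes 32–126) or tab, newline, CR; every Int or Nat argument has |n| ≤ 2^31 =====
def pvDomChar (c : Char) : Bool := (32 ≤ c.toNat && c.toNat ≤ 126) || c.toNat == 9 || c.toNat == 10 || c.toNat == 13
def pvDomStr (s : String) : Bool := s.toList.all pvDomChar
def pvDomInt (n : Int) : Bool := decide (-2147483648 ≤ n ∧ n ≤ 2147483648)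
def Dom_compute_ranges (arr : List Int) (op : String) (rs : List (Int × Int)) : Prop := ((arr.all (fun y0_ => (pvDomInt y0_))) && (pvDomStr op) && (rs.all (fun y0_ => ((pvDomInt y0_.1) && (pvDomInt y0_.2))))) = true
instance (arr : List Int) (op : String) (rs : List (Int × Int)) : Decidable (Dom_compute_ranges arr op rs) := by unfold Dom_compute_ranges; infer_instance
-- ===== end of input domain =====

-- B replaces A's per-query rescan of arr by precomputed prefix sums (resp. prefix products
-- of the nonzero elements plus prefix zero counts), answering each query by subtraction /
-- exact division (objective: alternative algorithm).

-- ===== PORT A =====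
def compute_ranges (arr : List Int) (op : String) (rs : List (Int × Int)) : List Int :=
  if op = "*" then
    (PySem.List.pyRange 0 rs.length 1).foldl (fun output i =>
      output ++ [(PySem.List.pyRange (PySem.List.pyGetD rs i (0, 0)).1 (PySem.List.pyGetD rs i (0, 0)).2 1).foldl
        (fun result r => result * PySem.List.pyGetD arr r 0) 1]) []
  else if op = "+" then
    (PySem.List.pyRange 0 rs.length 1).foldl (fun output i =>
      output ++ [(PySem.List.pyRange (PySem.List.pyGetD rs i (0, 0)).1 (PySem.List.pyGetD rs i (0, 0)).2 1).foldl
        (fun result r => result + PySem.List.pyGetD arr r 0) 0]) []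
  else []

-- ===== PORT B =====
def compute_ranges_alt (arr : List Int) (op : String) (rs : List (Int × Int)) : List Int :=
  if op = "+" then
    let st := arr.foldl (fun (st : List Int × Int) x => (st.1 ++ [st.2 + x], st.2 + x)) ([0], 0)
    rs.map (fun q => if q.1 < q.2 then PySem.List.pyGetD st.1 q.2 0 - PySem.List.pyGetD st.1 q.1 0 else 0)
  else if op = "*" then
    let st := arr.foldl (fun (st : List Int × List Int × Int × Int) x =>
      let p := if x = 0 then st.2.2.1 else st.2.2.1 * x
      let z := if x = 0 then st.2.2.2 + 1 else st.2.2.2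
      (st.1 ++ [p], st.2.1 ++ [z], p, z)) ([1], [0], 1, 0)
    rs.map (fun q => if q.1 < q.2 then
        (if PySem.List.pyGetD st.2.1 q.2 0 > PySem.List.pyGetD st.2.1 q.1 0 then 0
         else PySem.Int.floordiv (PySem.List.pyGetD st.1 q.2 0) (PySem.List.pyGetD st.1 q.1 0))
      else 1)
  else []

-- ===== PRECONDITION & SPEC =====
-- Pre_ excludes queries whose non-empty index range reaches outside [0, len(arr)): there A either
-- raises IndexError or accidentally wraps negative indices element by element, a value both
-- programs produce only by accident of Python indexing.
def Pre_compute_ranges (arr : List Int) (op : String) (rs : List (Int × Int)) : Prop :=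
  (op = "+" ∨ op = "*") → ∀ q ∈ rs, q.1 < q.2 → 0 ≤ q.1 ∧ q.2 ≤ (arr.length : Int)
instance (arr : List Int) (op : String) (rs : List (Int × Int)) : Decidable (Pre_compute_ranges arr op rs) := by unfold Pre_compute_ranges; infer_instance
def pvWitness_compute_ranges : List Int × String × (List (Int × Int)) := ([2, 0, -3, 5], "*", [(0, 3), (2, 4), (3, 3)])

def Spec_compute_ranges (arr : List Int) (op : String) (rs : List (Int × Int)) (out : List Int) : Prop := out = compute_ranges_alt arr op rs
instance (arr : List Int) (op : String) (rs : List (Int × Int)) (out : List Int) : Decidable (Spec_compute_ranges arr op rs out) := by unfold Spec_compute_ranges; infer_instance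

-- ===== CLAIM (what is proved, stated in full; the proofs are below) =====
def Claim_equal_compute_ranges : Prop := ∀ (arr : List Int) (op : String) (rs : List (Int × Int)), Dom_compute_ranges arr op rs → Pre_compute_ranges arr op rs → Spec_compute_ranges arr op rs (compute_ranges arr op rs)

-- ===== LEMMAS AND PROOFS =====

-- product of the nonzero elements / number of zero elements
def pvNZ (l : List Int) : Int := (l.filter (fun x => decide (¬ x = 0))).prod
def pvZC (l : List Int) : Int := (l.countP (fun x => decide (x = 0)) : Int)

theorem pv_ps_build (t : List Int) : ∀ (ps0 : List Int) (s0 : Int),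
    (t.foldl (fun (st : List Int × Int) x => (st.1 ++ [st.2 + x], st.2 + x)) (ps0 ++ [s0], s0))
    = (ps0 ++ (List.range (t.length + 1)).map (fun i => s0 + (t.take i).sum), s0 + t.sum) := by
  induction t with
  | nil => simp
  | cons x t ih =>
    intro ps0 s0
    have step : (x :: t).foldl (fun (st : List Int × Int) x => (st.1 ++ [st.2 + x], st.2 + x)) (ps0 ++ [s0], s0)
        = t.foldl (fun (st : List Int × Int) x => (st.1 ++ [st.2 + x], st.2 + x)) ((ps0 ++ [s0]) ++ [s0 + x], s0 + x) := rfl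
    rw [step, ih]
    simp only [Prod.mk.injEq]
    refine ⟨?_, by simp [add_assoc]⟩
    simp [List.range_succ_eq_map, List.map_map, Function.comp_def, add_assoc]

theorem pv_pz_build (t : List Int) : ∀ (pz0 zc0 : List Int) (p0 z0 : Int),
    (t.foldl (fun (st : List Int × List Int × Int × Int) x =>
      let p := if x = 0 then st.2.2.1 else st.2.2.1 * x
      let z := if x = 0 then st.2.2.2 + 1 else st.2.2.2
      (st.1 ++ [p], st.2.1 ++ [z], p, z)) (pz0 ++ [p0], zc0 ++ [z0], p0, z0))
    = (pz0 ++ (List.range (t.length + 1)).map (fun i => p0 * pvNZ (t.take i)),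
       zc0 ++ (List.range (t.length + 1)).map (fun i => z0 + pvZC (t.take i)),
       p0 * pvNZ t, z0 + pvZC t) := by
  induction t with
  | nil => simp [pvNZ, pvZC]
  | cons x t ih =>
    intro pz0 zc0 p0 z0
    by_cases hx : x = 0
    · have step : (x :: t).foldl (fun (st : List Int × List Int × Int × Int) x =>
          let p := if x = 0 then st.2.2.1 else st.2.2.1 * x
          let z := if x = 0 then st.2.2.2 + 1 else st.2.2.2
          (st.1 ++ [p], st.2.1 ++ [z], p, z)) (pz0 ++ [p0], zc0 ++ [z0], p0, z0)
          = t.foldl (fun (st : List Int × List Int × Int × Int) x =>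
          let p := if x = 0 then st.2.2.1 else st.2.2.1 * x
          let z := if x = 0 then st.2.2.2 + 1 else st.2.2.2
          (st.1 ++ [p], st.2.1 ++ [z], p, z)) ((pz0 ++ [p0]) ++ [p0], (zc0 ++ [z0]) ++ [z0 + 1], p0, z0 + 1) := by
        simp [hx]
      rw [step, ih]
      simp only [Prod.mk.injEq]
      refine ⟨?_, ?_, ?_, ?_⟩
      · simp [List.range_succ_eq_map, List.map_map, Function.comp_def, pvNZ, hx]
      · simp [List.range_succ_eq_map, List.map_map, Function.comp_def, pvZC, hx]
        intro a _; ring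
      · simp [pvNZ, hx]
      · simp [pvZC, hx]; ring
    · have step : (x :: t).foldl (fun (st : List Int × List Int × Int × Int) x =>
          let p := if x = 0 then st.2.2.1 else st.2.2.1 * x
          let z := if x = 0 then st.2.2.2 + 1 else st.2.2.2
          (st.1 ++ [p], st.2.1 ++ [z], p, z)) (pz0 ++ [p0], zc0 ++ [z0], p0, z0)
          = t.foldl (fun (st : List Int × List Int × Int × Int) x =>
          let p := if x = 0 then st.2.2.1 else st.2.2.1 * x
          let z := if x = 0 then st.2.2.2 + 1 else st.2.2.2
          (st.1 ++ [p], st.2.1 ++ [z], p, z)) ((pz0 ++ [p0]) ++ [p0 * x], (zc0 ++ [z0]) ++ [z0], p0 * x, z0) := by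
        simp [hx]
      rw [step, ih]
      simp only [Prod.mk.injEq]
      refine ⟨?_, ?_, ?_, ?_⟩
      · simp [List.range_succ_eq_map, List.map_map, Function.comp_def, pvNZ, hx]
        intro a _; ring
      · simp [List.range_succ_eq_map, List.map_map, Function.comp_def, pvZC, hx]
      · simp [pvNZ, hx]; ring
      · simp [pvZC, hx]

theorem pv_getD_prefix (f : Nat → Int) (n : Nat) (i : Int) (h0 : 0 ≤ i) (h : i ≤ (n : Int)) :
    PySem.List.pyGetD ((List.range (n + 1)).map f) i 0 = f i.toNat := by
  rw [PySem.List.pyGetD_eq_getElem _ _ h0 (by simp; omega)]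
  simp

-- the slice arr[a:b] as take/drop, and the fold over range(a,b) as a fold over it
theorem pv_foldl_range_slice (arr : List Int) (a b : Int) (g : Int → Int → Int) (init : Int)
    (h0 : 0 ≤ a) (hb : b ≤ (arr.length : Int)) :
    (PySem.List.pyRange a b 1).foldl (fun result r => g result (PySem.List.pyGetD arr r 0)) init
    = ((arr.take b.toNat).drop a.toNat).foldl g init := by
  rcases lt_or_ge b 0 with hbneg | hbpos
  · rw [PySem.List.pyRange_one_eq_nil (by omega)]
    have : b.toNat = 0 := by omega
    simp [this]
  · have hlen : ((arr.take b.toNat).length : Int) = b := by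
      simp [List.length_take]; omega
    have hrw : (PySem.List.pyRange a b 1).foldl
        (fun result r => g result (PySem.List.pyGetD arr r 0)) init
        = (PySem.List.pyRange a ((arr.take b.toNat).length : Int) 1).foldl
        (fun result r => g result (PySem.List.pyGetD (arr.take b.toNat) r 0)) init := by
      rw [hlen]
      refine PySem.List.foldl_congr_mem _ _ _ _ ?_
      intro acc r hr
      rw [PySem.List.mem_pyRange_one] at hr
      rw [PySem.List.pyGetD_eq_getElem arr _ (by omega : 0 ≤ r) (by omega),
          PySem.List.pyGetD_eq_getElem (arr.take b.toNat) _ (by omega : 0 ≤ r) (by simp [List.length_take]; omega)]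
      simp [List.getElem_take]
    rw [hrw, PySem.List.foldl_pyRange_pyGetD' (arr.take b.toNat) 0 g init h0]

theorem pv_take_split (arr : List Int) (a b : Nat) (hab : a ≤ b) :
    arr.take a ++ (arr.take b).drop a = arr.take b := by
  conv_rhs => rw [← List.take_append_drop a (arr.take b)]
  rw [List.take_take, Nat.min_eq_left hab]

theorem pv_ps_build' (arr : List Int) :
    (arr.foldl (fun (st : List Int × Int) x => (st.1 ++ [st.2 + x], st.2 + x)) ([0], 0))
    = ((List.range (arr.length + 1)).map (fun i => (arr.take i).sum), arr.sum) := by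
  have h := pv_ps_build arr [] 0
  simpa using h

theorem pv_pz_build' (arr : List Int) :
    (arr.foldl (fun (st : List Int × List Int × Int × Int) x =>
      let p := if x = 0 then st.2.2.1 else st.2.2.1 * x
      let z := if x = 0 then st.2.2.2 + 1 else st.2.2.2
      (st.1 ++ [p], st.2.1 ++ [z], p, z)) ([1], [0], 1, 0))
    = ((List.range (arr.length + 1)).map (fun i => pvNZ (arr.take i)),
       (List.range (arr.length + 1)).map (fun i => pvZC (arr.take i)),
       pvNZ arr, pvZC arr) := by
  have h := pv_pz_build arr [] [] 1 0
  simpa using h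

theorem pv_zc_nonneg (l : List Int) : 0 ≤ pvZC l := by
  unfold pvZC; positivity

theorem pv_query_add (arr : List Int) (a b : Int) (h0 : 0 ≤ a) (hb : b ≤ (arr.length : Int))
    (hab : a < b) :
    (PySem.List.pyRange a b).foldl (fun result r => result + PySem.List.pyGetD arr r 0) 0
    = (arr.take b.toNat).sum - (arr.take a.toNat).sum := by
  rw [pv_foldl_range_slice arr a b _ _ h0 hb]
  have hsplit := pv_take_split arr a.toNat b.toNat (by omega)
  have hsum : (arr.take b.toNat).sum = (arr.take a.toNat).sum + ((arr.take b.toNat).drop a.toNat).sum := by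
    conv_lhs => rw [← hsplit]
    rw [List.sum_append]
  have hfold : ((arr.take b.toNat).drop a.toNat).foldl (fun result r => result + r) 0
      = ((arr.take b.toNat).drop a.toNat).sum := by
    simp [List.sum_eq_foldl]
  rw [hfold]
  omega

theorem pv_query_mul (arr : List Int) (a b : Int) (h0 : 0 ≤ a) (hb : b ≤ (arr.length : Int))
    (hab : a < b) :
    (PySem.List.pyRange a b).foldl (fun result r => result * PySem.List.pyGetD arr r 0) 1
    = (if pvZC (arr.take b.toNat) > pvZC (arr.take a.toNat) then 0
       else PySem.Int.floordiv (pvNZ (arr.take b.toNat)) (pvNZ (arr.take a.toNat))) := by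
  rw [pv_foldl_range_slice arr a b _ _ h0 hb]
  have hsplit := pv_take_split arr a.toNat b.toNat (by omega)
  have hNZ : pvNZ (arr.take b.toNat)
      = pvNZ (arr.take a.toNat) * pvNZ ((arr.take b.toNat).drop a.toNat) := by
    conv_lhs => rw [← hsplit]
    simp [pvNZ, List.filter_append]
  have hZC : pvZC (arr.take b.toNat)
      = pvZC (arr.take a.toNat) + pvZC ((arr.take b.toNat).drop a.toNat) := by
    conv_lhs => rw [← hsplit]
    simp [pvZC, List.countP_append]
  have hfold : ((arr.take b.toNat).drop a.toNat).foldl (fun result r => result * r) 1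
      = ((arr.take b.toNat).drop a.toNat).prod := by
    rw [List.prod_eq_foldl]
  rw [hfold]
  by_cases hz : pvZC (arr.take b.toNat) > pvZC (arr.take a.toNat)
  · rw [if_pos hz]
    have hzs : 0 < ((arr.take b.toNat).drop a.toNat).countP (fun x => decide (x = 0)) := by
      have := hZC; unfold pvZC at this hz; omega
    rw [List.countP_pos_iff] at hzs
    obtain ⟨x, hxmem, hx0⟩ := hzs
    simp only [decide_eq_true_eq] at hx0
    subst hx0
    exact List.prod_eq_zero hxmem
  · rw [if_neg hz]
    have hzs : ((arr.take b.toNat).drop a.toNat).countP (fun x => decide (x = 0)) = 0 := by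
      have h1 := pv_zc_nonneg ((arr.take b.toNat).drop a.toNat)
      have h2 := hZC
      unfold pvZC at h1 hz h2
      omega
    have hall : ∀ x ∈ (arr.take b.toNat).drop a.toNat, ¬ x = 0 := by
      intro x hx
      have := List.countP_eq_zero.mp hzs x hx
      simpa using this
    have hNZs : pvNZ ((arr.take b.toNat).drop a.toNat) = ((arr.take b.toNat).drop a.toNat).prod := by
      unfold pvNZ
      rw [List.filter_eq_self.mpr (by intro x hx; simpa using hall x hx)]
    have hnz : pvNZ (arr.take a.toNat) ≠ 0 := by
      unfold pvNZ
      apply List.prod_ne_zero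
      intro hmem
      have := List.of_mem_filter hmem
      simp at this
    rw [hNZ, hNZs]
    show _ = (pvNZ (arr.take a.toNat) * ((arr.take b.toNat).drop a.toNat).prod).fdiv (pvNZ (arr.take a.toNat))
    rw [Int.mul_fdiv_cancel_left _ hnz]

-- ===== VERDICT (by name: the statement is the Claim_ definition above) =====
theorem compute_ranges_spec : Claim_equal_compute_ranges := by
  intro arr op rs _hdom hpre
  unfold Spec_compute_ranges
  by_cases hm : op = "*"
  · subst hm
    unfold compute_ranges compute_ranges_alt
    rw [if_pos rfl, if_neg (by decide), if_pos rfl]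
    rw [PySem.List.foldl_append_singleton_eq_map, List.nil_append]
    rw [pv_pz_build']
    have hmapA : (PySem.List.pyRange 0 (rs.length : Int)).map
        (fun i => (PySem.List.pyRange (PySem.List.pyGetD rs i ((0:Int),(0:Int))).1
            (PySem.List.pyGetD rs i ((0:Int),(0:Int))).2).foldl
          (fun result r => result * PySem.List.pyGetD arr r 0) 1)
        = rs.map (fun q => (PySem.List.pyRange q.1 q.2).foldl
            (fun result r => result * PySem.List.pyGetD arr r 0) 1) := by
      conv_rhs => rw [← PySem.List.map_pyGetD_pyRange_zero' rs ((0:Int),(0:Int))]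
      rw [List.map_map]
      rfl
    rw [hmapA]
    show rs.map _ = rs.map (fun q => if q.1 < q.2 then
        (if PySem.List.pyGetD ((List.range (arr.length + 1)).map (fun i => pvZC (arr.take i))) q.2 0
            > PySem.List.pyGetD ((List.range (arr.length + 1)).map (fun i => pvZC (arr.take i))) q.1 0 then 0
         else PySem.Int.floordiv
            (PySem.List.pyGetD ((List.range (arr.length + 1)).map (fun i => pvNZ (arr.take i))) q.2 0)
            (PySem.List.pyGetD ((List.range (arr.length + 1)).map (fun i => pvNZ (arr.take i))) q.1 0))
      else 1)
    refine List.map_congr_left ?_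
    rintro ⟨a, b⟩ hq
    by_cases hab : a < b
    · obtain ⟨h0, hb⟩ := hpre (Or.inr rfl) ⟨a, b⟩ hq hab
      simp only [if_pos hab]
      rw [pv_getD_prefix _ _ _ (by omega : (0:Int) ≤ b) hb,
          pv_getD_prefix _ _ _ h0 (by omega : a ≤ (arr.length : Int)),
          pv_getD_prefix _ _ _ (by omega : (0:Int) ≤ b) hb,
          pv_getD_prefix _ _ _ h0 (by omega : a ≤ (arr.length : Int))]
      exact pv_query_mul arr a b h0 hb hab
    · simp only [if_neg hab]
      rw [PySem.List.pyRange_one_eq_nil (by omega)]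
      rfl
  · by_cases hp : op = "+"
    · subst hp
      unfold compute_ranges compute_ranges_alt
      rw [if_neg (by decide), if_pos rfl, if_pos rfl]
      rw [PySem.List.foldl_append_singleton_eq_map, List.nil_append]
      rw [pv_ps_build']
      have hmapA : (PySem.List.pyRange 0 (rs.length : Int)).map
          (fun i => (PySem.List.pyRange (PySem.List.pyGetD rs i ((0:Int),(0:Int))).1
              (PySem.List.pyGetD rs i ((0:Int),(0:Int))).2).foldl
            (fun result r => result + PySem.List.pyGetD arr r 0) 0)
          = rs.map (fun q => (PySem.List.pyRange q.1 q.2).foldl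
              (fun result r => result + PySem.List.pyGetD arr r 0) 0) := by
        conv_rhs => rw [← PySem.List.map_pyGetD_pyRange_zero' rs ((0:Int),(0:Int))]
        rw [List.map_map]
        rfl
      rw [hmapA]
      show rs.map _ = rs.map (fun q => if q.1 < q.2 then
          PySem.List.pyGetD ((List.range (arr.length + 1)).map (fun i => (arr.take i).sum)) q.2 0
          - PySem.List.pyGetD ((List.range (arr.length + 1)).map (fun i => (arr.take i).sum)) q.1 0
        else 0)
      refine List.map_congr_left ?_
      rintro ⟨a, b⟩ hq
      by_cases hab : a < b
      · obtain ⟨h0, hb⟩ := hpre (Or.inl rfl) ⟨a, b⟩ hq hab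
        simp only [if_pos hab]
        rw [pv_getD_prefix _ _ _ (by omega : (0:Int) ≤ b) hb,
            pv_getD_prefix _ _ _ h0 (by omega : a ≤ (arr.length : Int))]
        exact pv_query_add arr a b h0 hb hab
      · simp only [if_neg hab]
        rw [PySem.List.pyRange_one_eq_nil (by omega)]
        rfl
    · unfold compute_ranges compute_ranges_alt
      rw [if_neg hm, if_neg hp, if_neg hp, if_neg hm]
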